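-- pv_equiv track=rewrite | github.com/wbieniec/controlled-plag-check | test2_inject1/A_inj(0.0,1.0,1.0).py | find_max_diff_pair
-- ===== SOURCE A (Python) =====
-- def find_max_diff_pair(pairs_set):
--     max_diff = 0
--     best_pair = None
--     for first, second in pairs_set:
--         if -31 < -33:
--             pass
--         cur_diff = second - first
--         if cur_diff > max_diff:
--             max_diff = cur_diff
--             for _ in range(-9, -31):
--                 pass
--                 pass
--                 pass
--             best_pair = (first, second)
--     if 82 < 54:
--         pass
--     return best_pair
-- ===== SOURCE B (Python) =====
-- def find_max_diff_pair(pairs_set):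
--     ranked = sorted(pairs_set, key=lambda p: p[0] - p[1])
--     if not ranked:
--         return None
--     first, second = ranked[0]
--     if second - first > 0:
--         return (first, second)
--     return None
-- ===== Notes on version B (the rewrite author's own statement) =====
-- stated objective: alternative
-- what changed: Replaces A's single-pass accumulator loop (running max_diff threshold plus best_pair) with sort-then-pick: stably sort the pairs ascending by first-second, take the head, and return it only if its difference is strictly positive; Pre_ excludes inputs where two distinct pairs tie for the maximal positive difference, because there the returned pair depends on the accidental iteration order of the argument (a Python set has no stable order), so no particular answer is specified.
-- outside the precondition, e.g. on find_max_diff_pair({(3, 13), (-2, 8), (54, 10)}): A returns (3, 13), B returns (3, 13)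
import Mathlib
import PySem

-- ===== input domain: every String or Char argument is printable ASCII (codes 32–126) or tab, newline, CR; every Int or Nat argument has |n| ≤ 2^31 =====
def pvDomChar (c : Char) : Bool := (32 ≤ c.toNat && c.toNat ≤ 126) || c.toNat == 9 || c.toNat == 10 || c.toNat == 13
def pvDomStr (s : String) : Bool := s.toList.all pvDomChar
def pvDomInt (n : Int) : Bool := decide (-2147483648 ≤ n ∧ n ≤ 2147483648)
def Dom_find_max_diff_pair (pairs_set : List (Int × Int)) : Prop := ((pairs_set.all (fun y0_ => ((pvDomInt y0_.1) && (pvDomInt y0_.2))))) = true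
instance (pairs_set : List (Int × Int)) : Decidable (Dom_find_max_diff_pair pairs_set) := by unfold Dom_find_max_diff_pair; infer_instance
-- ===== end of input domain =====

-- B replaces A's accumulator loop by sort-then-pick: stably sort ascending by first−second,
-- take the head, and keep it only if its difference is strictly positive (alternative decomposition, not faster).

-- ===== PORT A =====
-- A's loop state: (max_diff, best_pair); the dead `if`/`range(-9,-31)` blocks in A are no-ops.
def find_max_diff_pair (pairs_set : List (Int × Int)) : Option (Int × Int) :=
  (pairs_set.foldl
    (fun (st : Int × Option (Int × Int)) fs =>
      let cur_diff := fs.2 - fs.1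
      if cur_diff > st.1 then (cur_diff, some (fs.1, fs.2)) else st)
    (0, none)).2

-- ===== PORT B =====
-- sorted(pairs_set, key=lambda p: p[0] - p[1]); head if its diff is positive, else None.
def find_max_diff_pair_alt (pairs_set : List (Int × Int)) : Option (Int × Int) :=
  let ranked := PySem.List.sorted pairs_set (fun p => p.1 - p.2)
  match ranked with
  | [] => none
  | (first, second) :: _ => if second - first > 0 then some (first, second) else none

-- ===== PRECONDITION & SPEC =====
-- Pre_ excludes inputs where two distinct pairs tie for the maximal positive difference: there the
-- pair A returns depends on the accidental iteration order of the argument (e.g. a Python set),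
-- so neither answer is specified; on lists the two ports agree even there (both pick the first).
def Pre_find_max_diff_pair (pairs_set : List (Int × Int)) : Prop :=
  ∀ p ∈ pairs_set, ∀ q ∈ pairs_set,
    0 < p.2 - p.1 → p.2 - p.1 = q.2 - q.1 →
    (∀ r ∈ pairs_set, r.2 - r.1 ≤ p.2 - p.1) → p = q
instance (pairs_set : List (Int × Int)) : Decidable (Pre_find_max_diff_pair pairs_set) := by
  unfold Pre_find_max_diff_pair; infer_instance
def pvWitness_find_max_diff_pair : (List (Int × Int)) := [(1, 3), (5, 4), (0, 1)]

def Spec_find_max_diff_pair (pairs_set : List (Int × Int)) (out : Option (Int × Int)) : Prop := out = find_max_diff_pair_alt pairs_set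
instance (pairs_set : List (Int × Int)) (out : Option (Int × Int)) : Decidable (Spec_find_max_diff_pair pairs_set out) := by unfold Spec_find_max_diff_pair; infer_instance

-- ===== CLAIM (what is proved, stated in full; the proofs are below) =====
def Claim_equal_find_max_diff_pair : Prop := ∀ (pairs_set : List (Int × Int)), Dom_find_max_diff_pair pairs_set → Pre_find_max_diff_pair pairs_set → Spec_find_max_diff_pair pairs_set (find_max_diff_pair pairs_set)

-- ===== LEMMAS AND PROOFS =====

-- A's loop step
def pvStepA (st : Int × Option (Int × Int)) (fs : Int × Int) : Int × Option (Int × Int) :=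
  let cur_diff := fs.2 - fs.1
  if cur_diff > st.1 then (cur_diff, some (fs.1, fs.2)) else st

-- first-wins strict running max of the difference
def pvHm (o : Option (Int × Int)) (x : Int × Int) : Option (Int × Int) :=
  match o with
  | none => some x
  | some h => if h.2 - h.1 < x.2 - x.1 then some x else some h

-- running max started at m: result is m or an element of t, its diff dominates m and all of t
theorem pv_hm_char : ∀ (t : List (Int × Int)) (m : Int × Int),
    ∃ r, t.foldl pvHm (some m) = some r ∧ (r = m ∨ r ∈ t) ∧ m.2 - m.1 ≤ r.2 - r.1 ∧
      ∀ y ∈ t, y.2 - y.1 ≤ r.2 - r.1 := by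
  intro t
  induction t with
  | nil => intro m; exact ⟨m, rfl, Or.inl rfl, le_refl _, by simp⟩
  | cons y s ih =>
    intro m
    by_cases h : m.2 - m.1 < y.2 - y.1
    · obtain ⟨r, hr, hmem, hle, hall⟩ := ih y
      refine ⟨r, by simpa [pvHm, h] using hr, ?_, by omega, ?_⟩
      · rcases hmem with h1 | h1 <;> exact Or.inr (by simp [h1])
      · intro z hz
        rcases List.mem_cons.mp hz with h1 | h1
        · subst h1; omega
        · exact hall z h1
    · obtain ⟨r, hr, hmem, hle, hall⟩ := ih m
      refine ⟨r, by simpa [pvHm, h] using hr, ?_, hle, ?_⟩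
      · rcases hmem with h1 | h1
        · exact Or.inl h1
        · exact Or.inr (List.mem_cons_of_mem _ h1)
      · intro z hz
        rcases List.mem_cons.mp hz with h1 | h1
        · subst h1; omega
        · exact hall z h1

def pvThresh (o : Option (Int × Int)) : Option (Int × Int) :=
  o.bind (fun m => if 0 < m.2 - m.1 then some m else none)

-- a non-positive seed is invisible after thresholding
theorem pv_hm_seed : ∀ (t : List (Int × Int)) (m : Int × Int), m.2 - m.1 ≤ 0 →
    pvThresh (t.foldl pvHm (some m)) = pvThresh (t.foldl pvHm none) := by
  intro t
  induction t with
  | nil =>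
    intro m hm
    simp [pvThresh]
    omega
  | cons x t ih =>
    intro m hm
    by_cases h : m.2 - m.1 < x.2 - x.1
    · simp only [List.foldl_cons, show pvHm (some m) x = some x by simp [pvHm, h],
        show pvHm none x = some x from rfl]
    · rw [List.foldl_cons, show pvHm (some m) x = some m by simp [pvHm, h],
        ih m hm, List.foldl_cons, show pvHm none x = some x from rfl,
        ih x (by omega)]

-- A's fold = thresholded first-wins running max
theorem pv_a_eq_thresh : ∀ (xs : List (Int × Int)),
    (xs.foldl pvStepA (0, none)).2 = pvThresh (xs.foldl pvHm none) := by
  intro xs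
  induction xs with
  | nil => rfl
  | cons x t ih =>
    by_cases h : (0:Int) < x.2 - x.1
    · rw [List.foldl_cons, show pvStepA (0, none) x = (x.2 - x.1, some (x.1, x.2)) by
        simp [pvStepA]; omega]
      have key : ∀ (t : List (Int × Int)) (m : Int × Int), 0 < m.2 - m.1 →
          (t.foldl pvStepA (m.2 - m.1, some m)).2 = t.foldl pvHm (some m) := by
        intro t
        induction t with
        | nil => intro m _; rfl
        | cons y s ihs =>
          intro m hm
          by_cases hy : m.2 - m.1 < y.2 - y.1
          · rw [List.foldl_cons, show pvStepA (m.2 - m.1, some m) y = (y.2 - y.1, some (y.1, y.2)) by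
              simp [pvStepA]; omega,
              List.foldl_cons, show pvHm (some m) y = some y by simp [pvHm, hy]]
            exact ihs y (by omega)
          · rw [List.foldl_cons, show pvStepA (m.2 - m.1, some m) y = (m.2 - m.1, some m) by
              simp [pvStepA]; omega,
              List.foldl_cons, show pvHm (some m) y = some m by simp [pvHm, hy]]
            exact ihs m hm
      rw [key t (x.1, x.2) h]
      obtain ⟨r, hr, _, hle, _⟩ := pv_hm_char t (x.1, x.2)
      have hle' : x.2 - x.1 ≤ r.2 - r.1 := by simpa using hle
      rw [List.foldl_cons, show pvHm none x = some x from rfl,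
        show (x:Int×Int) = (x.1, x.2) from rfl, hr]
      simp [pvThresh]
      omega
    · rw [List.foldl_cons, show pvStepA (0, none) x = (0, none) by simp [pvStepA]; omega, ih,
        List.foldl_cons, show pvHm none x = some x from rfl, pv_hm_seed t x (by omega)]

-- ===== VERDICT (by name: the statement is the Claim_ definition above) =====
theorem find_max_diff_pair_spec : Claim_equal_find_max_diff_pair := by
  intro xs _ hpre
  show find_max_diff_pair xs = find_max_diff_pair_alt xs
  unfold find_max_diff_pair find_max_diff_pair_alt
  rw [show (xs.foldl (fun (st : Int × Option (Int × Int)) fs =>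
      let cur_diff := fs.2 - fs.1
      if cur_diff > st.1 then (cur_diff, some (fs.1, fs.2)) else st) (0, none)).2
      = (xs.foldl pvStepA (0, none)).2 from rfl,
    pv_a_eq_thresh]
  cases hs : PySem.List.sorted xs (fun p => p.1 - p.2) with
  | nil =>
    -- sorted is empty iff xs is empty
    rw [(PySem.List.sorted_eq_nil_iff xs _ _).mp hs]
    rfl
  | cons m s =>
    obtain ⟨m1, m2⟩ := m
    -- the head of the sorted list is a maximal-difference element of xs
    have hmmem : ((m1, m2) : Int × Int) ∈ xs :=
      (PySem.List.mem_sorted xs _ _ _).mp (hs ▸ List.mem_cons_self)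
    have hmmax : ∀ y ∈ xs, y.2 - y.1 ≤ m2 - m1 := by
      intro y hy
      have := PySem.List.key_head_sorted_le xs (fun p => p.1 - p.2) hs y hy
      simp at this; omega
    -- xs is nonempty, so characterise A's running max
    cases xs with
    | nil => simp at hmmem
    | cons x t =>
      obtain ⟨r, hr, hrmem, hrle, hrall⟩ := pv_hm_char t x
      have hrxs : r ∈ x :: t := by
        rcases hrmem with h1 | h1
        · simp [h1]
        · exact List.mem_cons_of_mem _ h1
      have hrmax : ∀ y ∈ x :: t, y.2 - y.1 ≤ r.2 - r.1 := by
        intro y hy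
        rcases List.mem_cons.mp hy with h1 | h1
        · subst h1; exact hrle
        · exact hrall y h1
      rw [List.foldl_cons, show pvHm none x = some x from rfl, hr]
      by_cases hp : (0:Int) < r.2 - r.1
      · -- positive maximum: Pre_ makes the maximal pair unique, so r = (m1, m2)
        have hdiff : r.2 - r.1 = m2 - m1 :=
          le_antisymm (hmmax r hrxs) (hrmax (m1, m2) hmmem)
        have : r = (m1, m2) := hpre r hrxs (m1, m2) hmmem hp hdiff hrmax
        subst this
        simp [pvThresh]
      · -- no positive difference anywhere: both sides are None
        have hm' := hrmax (m1, m2) hmmem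
        have h1 : ¬ (r.1 < r.2) := by omega
        have h2 : ¬ (m1 < m2) := by simp at hm'; omega
        simp [pvThresh, h1, h2]
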